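-- pv_equiv track=rewrite | github.com/KohiiTM/Audio-To-Guitar-Tabs | tab_generator.py | generate_tab
-- ===== SOURCE A (Python) =====
-- STANDARD_TUNING = [40, 45, 50, 55, 59, 64]  # MIDI numbers for E2, A2, D3, G3, B3, E4
--
-- STRING_NAMES = ['E', 'A', 'D', 'G', 'B', 'e']
--
-- NOTE_TO_MIDI = {
--     'C': 0, 'C#': 1, 'D': 2, 'D#': 3, 'E': 4, 'F': 5, 'F#': 6, 'G': 7, 'G#': 8, 'A': 9, 'A#': 10, 'B': 11
-- }
--
-- def note_name_to_midi(note):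
--     # e.g. 'A4' -> 69
--     if note == 'Unknown':
--         return None
--     if len(note) < 2:
--         return None
--     name = note[:-1]
--     octave = int(note[-1])
--     if name not in NOTE_TO_MIDI:
--         return None
--     return 12 * (octave + 1) + NOTE_TO_MIDI[name]
--
-- def find_string_and_fret(midi_num):
--     # Return (string_index, fret) for lowest fret possible
--     best = None
--     for i, open_midi in enumerate(STANDARD_TUNING):
--         fret = midi_num - open_midi
--         if 0 <= fret <= 20:  # reasonable fret range
--             if best is None or fret < best[1]:
--                 best = (i, fret)
--     return best  # (string_index, fret) or None
--
-- def generate_tab(pitch_estimates, notes_per_measure=16, measures_per_line=4):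
--     # Each pitch_estimate: {'note': 'A4', ...}
--     tab_lines = [list(STRING_NAMES[i] + '|') for i in range(6)]
--     note_count = 0
--     measure_count = 0
--     for est in pitch_estimates:
--         midi = note_name_to_midi(est['note'])
--         if midi is None:
--             # Add a rest (dash) to all strings
--             for line in tab_lines:
--                 line.append('-')
--             note_count += 1
--         else:
--             pos = find_string_and_fret(midi)
--             for i in range(6):
--                 if pos is not None and i == pos[0]:
--                     line_val = str(pos[1]) if pos[1] < 10 else str(pos[1])
--                     tab_lines[i].append(line_val)
--                 else:
--                     tab_lines[i].append('-')
--             note_count += 1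
--         # Add bar line at measure boundary
--         if note_count % notes_per_measure == 0:
--             for line in tab_lines:
--                 line.append('|')
--             measure_count += 1
--         # Add line break after measures_per_line
--         if measure_count > 0 and measure_count % measures_per_line == 0 and note_count % notes_per_measure == 0:
--             for i in range(6):
--                 tab_lines[i].append('\n' + STRING_NAMES[i] + '|')
--     # Join lines
--     # Remove trailing bar if present
--     tab_strs = []
--     for line in tab_lines:
--         s = ''.join(line)
--         if s.endswith('|'):
--             s = s[:-1]
--         tab_strs.append(s)
--     return '\n'.join(tab_strs)
-- ===== SOURCE B (Python) =====
-- # B: two-pass rewrite — build a single column/token stream once, then render the six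
-- # string lines by transposition; lowest-fret position found by scanning the tuning
-- # from the highest string down and taking the first in-range fret.
--
-- STANDARD_TUNING = [40, 45, 50, 55, 59, 64]
-- STRING_NAMES = ['E', 'A', 'D', 'G', 'B', 'e']
-- NOTE_TO_MIDI = {
--     'C': 0, 'C#': 1, 'D': 2, 'D#': 3, 'E': 4, 'F': 5, 'F#': 6, 'G': 7, 'G#': 8, 'A': 9, 'A#': 10, 'B': 11
-- }
--
--
-- def _note_to_midi(note):
--     if note == 'Unknown' or len(note) < 2:
--         return None
--     semitone = NOTE_TO_MIDI.get(note[:-1])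
--     if semitone is None:
--         return None
--     return 12 * (int(note[-1]) + 1) + semitone
--
--
-- def _find_pos(midi):
--     # tuning is strictly increasing, so the first in-range fret scanning from the
--     # highest string is the lowest fret overall
--     for i in range(5, -1, -1):
--         fret = midi - STANDARD_TUNING[i]
--         if 0 <= fret <= 20:
--             return (i, fret)
--     return None
--
--
-- def generate_tab(pitch_estimates, notes_per_measure=16, measures_per_line=4):
--     # pass 1: one token stream shared by all strings
--     tokens = []  # ('note', pos-or-None) | ('bar', None) | ('break', None)
--     note_count = 0
--     measure_count = 0
--     for est in pitch_estimates:
--         midi = _note_to_midi(est['note'])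
--         pos = _find_pos(midi) if midi is not None else None
--         tokens.append(('note', pos))
--         note_count += 1
--         if note_count % notes_per_measure == 0:
--             tokens.append(('bar', None))
--             measure_count += 1
--             if measure_count % measures_per_line == 0:
--                 tokens.append(('break', None))
--     # pass 2: render each string line from the stream
--     lines = []
--     for i, name in enumerate(STRING_NAMES):
--         parts = [name + '|']
--         for kind, pos in tokens:
--             if kind == 'note':
--                 parts.append(str(pos[1]) if pos is not None and pos[0] == i else '-')
--             elif kind == 'bar':
--                 parts.append('|')
--             else:
--                 parts.append('\n' + name + '|')
--         s = ''.join(parts)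
--         lines.append(s[:-1] if s.endswith('|') else s)
--     return '\n'.join(lines)
-- ===== Notes on version B (the rewrite author's own statement) =====
-- stated objective: alternative
-- what changed: A mutates six parallel per-string line buffers inside one loop with range(6) inner passes; B builds a single shared token stream (note/bar/line-break columns) in one pass and then renders each of the six string lines from it, finding the lowest-fret position by scanning the tuning from the highest string down and taking the first in-range fret instead of A's best-so-far minimum scan.
import Mathlib
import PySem

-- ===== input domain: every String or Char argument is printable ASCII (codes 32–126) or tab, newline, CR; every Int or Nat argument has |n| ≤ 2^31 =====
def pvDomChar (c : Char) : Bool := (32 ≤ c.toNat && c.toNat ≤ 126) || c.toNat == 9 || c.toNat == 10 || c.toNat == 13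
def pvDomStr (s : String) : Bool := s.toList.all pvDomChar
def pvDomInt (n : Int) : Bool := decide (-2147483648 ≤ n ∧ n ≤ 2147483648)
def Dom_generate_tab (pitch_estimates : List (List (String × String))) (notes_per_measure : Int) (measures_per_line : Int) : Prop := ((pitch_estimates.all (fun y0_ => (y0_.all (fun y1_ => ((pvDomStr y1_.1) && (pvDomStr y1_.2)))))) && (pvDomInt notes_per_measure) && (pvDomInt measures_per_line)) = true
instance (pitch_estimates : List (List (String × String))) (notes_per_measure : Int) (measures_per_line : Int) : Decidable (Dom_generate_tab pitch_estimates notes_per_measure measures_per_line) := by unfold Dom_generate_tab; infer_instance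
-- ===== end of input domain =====

-- B rewrites A's six mutated per-string line buffers into a two-pass form: one shared
-- token stream (note/bar/line-break columns) built once, then each of the six string
-- lines rendered from it; the lowest-fret position is found by scanning the tuning from
-- the highest string down and taking the first in-range fret (objective: alternative).

-- ===== PORT A =====
def STANDARD_TUNING : List Int := [40, 45, 50, 55, 59, 64]

def STRING_NAMES : List String := ["E", "A", "D", "G", "B", "e"]

def NOTE_TO_MIDI : PySem.Dict String Int :=
  PySem.Dict.ofList [("C", 0), ("C#", 1), ("D", 2), ("D#", 3), ("E", 4), ("F", 5),
                     ("F#", 6), ("G", 7), ("G#", 8), ("A", 9), ("A#", 10), ("B", 11)]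

-- int(note[-1]) raises ValueError where ofChars? is none; those inputs are outside Pre_
def note_name_to_midi (note : String) : Option Int :=
  if note == "Unknown" then none
  else if PySem.Str.len note < 2 then none
  else
    let name := PySem.Str.slice note none (some (-1))
    match PySem.Int.ofChars? [(PySem.Str.pyGet? note (-1)).getD ' '] with
    | none => none
    | some octave =>
      if NOTE_TO_MIDI.contains name = false then none
      else some (12 * (octave + 1) + NOTE_TO_MIDI.getD name 0)

def fsaf_loop (midi : Int) : List (Int × Int) → Option (Int × Int) → Option (Int × Int)
  | [], best => best
  | (i, open_midi) :: rest, best =>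
    let fret := midi - open_midi
    let best' :=
      if 0 ≤ fret ∧ fret ≤ 20 then
        match best with
        | none => some (i, fret)
        | some b => if fret < b.2 then some (i, fret) else best
      else best
    fsaf_loop midi rest best'

def find_string_and_fret (midi : Int) : Option (Int × Int) :=
  fsaf_loop midi (PySem.List.enumerate STANDARD_TUNING 0) none

-- one iteration of A's loop body; est['note'] with a missing key raises KeyError (outside Pre_)
def a_step (npm mpl : Int) (st : List (List String) × Int × Int) (est : List (String × String)) :
    List (List String) × Int × Int :=
  let tl := st.1
  let midi := note_name_to_midi ((List.lookup "note" est).getD "")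
  let tl :=
    match midi with
    | none => tl.map (fun line => line ++ ["-"])
    | some m =>
      let pos := find_string_and_fret m
      -- 'for i in range(6): tab_lines[i].append(…)' rebuilt as the indexed map over range(6)
      (PySem.List.pyRange 0 6 1).map (fun i =>
        let line := PySem.List.pyGetD tl i []
        match pos with
        | some p =>
          if i == p.1 then line ++ [if p.2 < 10 then PySem.Int.toStr p.2 else PySem.Int.toStr p.2]
          else line ++ ["-"]
        | none => line ++ ["-"])
  let nc := st.2.1 + 1
  let tl :=
    if PySem.Int.mod nc npm == 0 then tl.map (fun line => line ++ ["|"]) else tl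
  let mc := if PySem.Int.mod nc npm == 0 then st.2.2 + 1 else st.2.2
  let tl :=
    if mc > 0 ∧ PySem.Int.mod mc mpl == 0 ∧ PySem.Int.mod nc npm == 0 then
      (PySem.List.pyRange 0 6 1).map (fun i =>
        PySem.List.pyGetD tl i [] ++ ["\n" ++ PySem.List.pyGetD STRING_NAMES i "" ++ "|"])
    else tl
  (tl, nc, mc)

def generate_tab (pitch_estimates : List (List (String × String))) (notes_per_measure : Int) (measures_per_line : Int) : String :=
  -- tab_lines = [list(STRING_NAMES[i] + '|') for i in range(6)]
  let tab_lines : List (List String) :=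
    (PySem.List.pyRange 0 6 1).map (fun i =>
      (PySem.List.pyGetD STRING_NAMES i "" ++ "|").toList.map (fun c => String.ofList [c]))
  let res := pitch_estimates.foldl (a_step notes_per_measure measures_per_line) (tab_lines, 0, 0)
  let tab_strs := res.1.map (fun line =>
    let s := PySem.Str.join "" line
    if PySem.Str.endswith s "|" then PySem.Str.slice s none (some (-1)) else s)
  PySem.Str.join "\n" tab_strs

-- ===== PORT B =====
inductive Tok
  | note : Option (Int × Int) → Tok
  | bar : Tok
  | brk : Tok
deriving DecidableEq, Repr

def note_to_midi_b (note : String) : Option Int :=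
  if note == "Unknown" || PySem.Str.len note < 2 then none
  else
    match NOTE_TO_MIDI.get? (PySem.Str.slice note none (some (-1))) with
    | none => none
    | some semitone =>
      match PySem.Int.ofChars? [(PySem.Str.pyGet? note (-1)).getD ' '] with
      | none => none  -- int(note[-1]) raises here in Python; outside Pre_
      | some octave => some (12 * (octave + 1) + semitone)

def find_pos_loop (midi : Int) : List Int → Option (Int × Int)
  | [] => none
  | i :: rest =>
    let fret := midi - PySem.List.pyGetD STANDARD_TUNING i 0
    if 0 ≤ fret ∧ fret ≤ 20 then some (i, fret) else find_pos_loop midi rest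

def find_pos (midi : Int) : Option (Int × Int) :=
  find_pos_loop midi (PySem.List.pyRange 5 (-1) (-1))

def b_step (npm mpl : Int) (st : List Tok × Int × Int) (est : List (String × String)) :
    List Tok × Int × Int :=
  let midi := note_to_midi_b ((List.lookup "note" est).getD "")
  let pos := match midi with | none => none | some m => find_pos m
  let toks := st.1 ++ [Tok.note pos]
  let nc := st.2.1 + 1
  if PySem.Int.mod nc npm == 0 then
    let toks := toks ++ [Tok.bar]
    let mc := st.2.2 + 1
    let toks := if PySem.Int.mod mc mpl == 0 then toks ++ [Tok.brk] else toks
    (toks, nc, mc)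
  else (toks, nc, st.2.2)

def renderTok (i : Int) (name : String) : Tok → String
  | Tok.note pos =>
    match pos with
    | some p => if p.1 == i then PySem.Int.toStr p.2 else "-"
    | none => "-"
  | Tok.bar => "|"
  | Tok.brk => "\n" ++ name ++ "|"

def generate_tab_alt (pitch_estimates : List (List (String × String))) (notes_per_measure : Int) (measures_per_line : Int) : String :=
  let res := pitch_estimates.foldl (b_step notes_per_measure measures_per_line) ([], 0, 0)
  let toks := res.1
  let lines := (PySem.List.enumerate STRING_NAMES 0).map (fun p =>
    let s := PySem.Str.join "" ((p.2 ++ "|") :: toks.map (renderTok p.1 p.2))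
    if PySem.Str.endswith s "|" then PySem.Str.slice s none (some (-1)) else s)
  PySem.Str.join "\n" lines

-- ===== PRECONDITION & SPEC =====
-- Pre_ excludes exactly the inputs where A raises: a missing 'note' key (KeyError),
-- a note whose last character int() cannot parse when the Unknown/length guards pass
-- (ValueError), notes_per_measure = 0 with a nonempty list (ZeroDivisionError), and
-- measures_per_line = 0 when some completed measure makes the break check evaluate
-- mc % measures_per_line (ZeroDivisionError).
def Pre_generate_tab (pitch_estimates : List (List (String × String))) (notes_per_measure : Int) (measures_per_line : Int) : Prop :=
  (pitch_estimates = [] ∨ notes_per_measure ≠ 0) ∧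
  (pitch_estimates = [] ∨ measures_per_line ≠ 0 ∨ pitch_estimates.length < notes_per_measure.natAbs) ∧
  (∀ est ∈ pitch_estimates,
    (List.lookup "note" est).isSome = true ∧
    ((List.lookup "note" est).getD "" = "Unknown" ∨
     PySem.Str.len ((List.lookup "note" est).getD "") < 2 ∨
     (PySem.Int.ofChars? [(PySem.Str.pyGet? ((List.lookup "note" est).getD "") (-1)).getD ' ']).isSome = true))

instance (pitch_estimates : List (List (String × String))) (notes_per_measure : Int) (measures_per_line : Int) : Decidable (Pre_generate_tab pitch_estimates notes_per_measure measures_per_line) := by unfold Pre_generate_tab; infer_instance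

def pvWitness_generate_tab : (List (List (String × String))) × Int × Int :=
  ([[("note", "A4")], [("note", "Unknown")]], 1, 2)

def Spec_generate_tab (pitch_estimates : List (List (String × String))) (notes_per_measure : Int) (measures_per_line : Int) (out : String) : Prop := out = generate_tab_alt pitch_estimates notes_per_measure measures_per_line
instance (pitch_estimates : List (List (String × String))) (notes_per_measure : Int) (measures_per_line : Int) (out : String) : Decidable (Spec_generate_tab pitch_estimates notes_per_measure measures_per_line out) := by unfold Spec_generate_tab; infer_instance

-- ===== CLAIM (what is proved, stated in full; the proofs are below) =====
def Claim_equal_generate_tab : Prop := ∀ (pitch_estimates : List (List (String × String))) (notes_per_measure : Int) (measures_per_line : Int), Dom_generate_tab pitch_estimates notes_per_measure measures_per_line → Pre_generate_tab pitch_estimates notes_per_measure measures_per_line → Spec_generate_tab pitch_estimates notes_per_measure measures_per_line (generate_tab pitch_estimates notes_per_measure measures_per_line)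

-- ===== LEMMAS AND PROOFS =====

-- the two note-name parsers agree (the branch order differs, the value does not)
lemma note_midi_eq (note : String) : note_name_to_midi note = note_to_midi_b note := by
  unfold note_name_to_midi note_to_midi_b
  by_cases h1 : note == "Unknown"
  · simp [h1]
  simp only [h1, Bool.false_or, if_neg, Bool.not_eq_true]
  by_cases h2 : note.length ≤ 1
  · simp [h2]
  simp [h2]
  cases hp : PySem.Int.ofChars? [(PySem.List.pyGet? note.toList (-1)).getD ' '] with
  | none =>
    cases hg : NOTE_TO_MIDI.get? (PySem.Str.slice note none (some (-1))) <;> simp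
  | some octave =>
    cases hg : NOTE_TO_MIDI.get? (PySem.Str.slice note none (some (-1))) with
    | none =>
      have hc : NOTE_TO_MIDI.contains (PySem.Str.slice note none (some (-1))) = false := by
        rw [PySem.Dict.contains_eq_isSome_get?, hg]; rfl
      simp [hc]
    | some sem =>
      have hc : NOTE_TO_MIDI.contains (PySem.Str.slice note none (some (-1))) = true := by
        rw [PySem.Dict.contains_eq_isSome_get?, hg]; rfl
      have hd : NOTE_TO_MIDI.getD (PySem.Str.slice note none (some (-1))) 0 = sem := by
        rw [PySem.Dict.getD_eq_get?_getD, hg]; rfl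
      simp [hc, hd]

-- A's lowest-fret scan over the increasing tuning equals B's first-hit scan from the high string down
lemma find_eq (midi : Int) : find_string_and_fret midi = find_pos midi := by
  have he : PySem.List.enumerate STANDARD_TUNING 0 = [(0,40),(1,45),(2,50),(3,55),(4,59),(5,64)] := by decide
  have hr : PySem.List.pyRange 5 (-1) (-1) = [5,4,3,2,1,0] := by decide
  unfold find_string_and_fret find_pos
  rw [he, hr]
  rcases lt_or_ge midi 40 with h | h
  · have c0 : ¬(40 ≤ midi ∧ midi ≤ 60) := by omega
    have c1 : ¬(45 ≤ midi ∧ midi ≤ 65) := by omega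
    have c2 : ¬(50 ≤ midi ∧ midi ≤ 70) := by omega
    have c3 : ¬(55 ≤ midi ∧ midi ≤ 75) := by omega
    have c4 : ¬(59 ≤ midi ∧ midi ≤ 79) := by omega
    have c5 : ¬(64 ≤ midi ∧ midi ≤ 84) := by omega
    have g1 : PySem.List.pyGetD ([40, 45, 50, 55, 59, 64] : List Int) 1 0 = 45 := by decide
    have g2 : PySem.List.pyGetD ([40, 45, 50, 55, 59, 64] : List Int) 2 0 = 50 := by decide
    have g3 : PySem.List.pyGetD ([40, 45, 50, 55, 59, 64] : List Int) 3 0 = 55 := by decide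
    have g4 : PySem.List.pyGetD ([40, 45, 50, 55, 59, 64] : List Int) 4 0 = 59 := by decide
    have g5 : PySem.List.pyGetD ([40, 45, 50, 55, 59, 64] : List Int) 5 0 = 64 := by decide
    simp [fsaf_loop, find_pos_loop, STANDARD_TUNING, c0, c1, c2, c3, c4, c5, g1, g2, g3, g4, g5]
  rcases lt_or_ge midi 85 with h2 | h2
  · interval_cases midi <;> decide
  · have c0 : ¬(40 ≤ midi ∧ midi ≤ 60) := by omega
    have c1 : ¬(45 ≤ midi ∧ midi ≤ 65) := by omega
    have c2 : ¬(50 ≤ midi ∧ midi ≤ 70) := by omega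
    have c3 : ¬(55 ≤ midi ∧ midi ≤ 75) := by omega
    have c4 : ¬(59 ≤ midi ∧ midi ≤ 79) := by omega
    have c5 : ¬(64 ≤ midi ∧ midi ≤ 84) := by omega
    have g1 : PySem.List.pyGetD ([40, 45, 50, 55, 59, 64] : List Int) 1 0 = 45 := by decide
    have g2 : PySem.List.pyGetD ([40, 45, 50, 55, 59, 64] : List Int) 2 0 = 50 := by decide
    have g3 : PySem.List.pyGetD ([40, 45, 50, 55, 59, 64] : List Int) 3 0 = 55 := by decide
    have g4 : PySem.List.pyGetD ([40, 45, 50, 55, 59, 64] : List Int) 4 0 = 59 := by decide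
    have g5 : PySem.List.pyGetD ([40, 45, 50, 55, 59, 64] : List Int) 5 0 = 64 := by decide
    simp [fsaf_loop, find_pos_loop, STANDARD_TUNING, c0, c1, c2, c3, c4, c5, g1, g2, g3, g4, g5]

-- the line of string i as A maintains it, expressed from B's token stream
def lineOf (i : Int) (name : String) (toks : List Tok) : List String :=
  (name ++ "|").toList.map (fun c => String.ofList [c]) ++ toks.map (renderTok i name)

def linesOf (toks : List Tok) : List (List String) :=
  (PySem.List.enumerate STRING_NAMES 0).map (fun p => lineOf p.1 p.2 toks)

lemma lineOf_append (i : Int) (name : String) (toks : List Tok) (t : Tok) :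
    lineOf i name (toks ++ [t]) = lineOf i name toks ++ [renderTok i name t] := by
  simp [lineOf]

lemma append_ite (c : Prop) [Decidable c] (l : List String) (a b : String) :
    (if c then l ++ [a] else l ++ [b]) = l ++ [if c then a else b] := by
  split_ifs <;> rfl

lemma getD6 {α : Type} (x0 x1 x2 x3 x4 x5 : α) (d : α) :
    PySem.List.pyGetD [x0, x1, x2, x3, x4, x5] (0 : Int) d = x0 ∧
    PySem.List.pyGetD [x0, x1, x2, x3, x4, x5] (1 : Int) d = x1 ∧
    PySem.List.pyGetD [x0, x1, x2, x3, x4, x5] (2 : Int) d = x2 ∧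
    PySem.List.pyGetD [x0, x1, x2, x3, x4, x5] (3 : Int) d = x3 ∧
    PySem.List.pyGetD [x0, x1, x2, x3, x4, x5] (4 : Int) d = x4 ∧
    PySem.List.pyGetD [x0, x1, x2, x3, x4, x5] (5 : Int) d = x5 := by
  refine ⟨?_, ?_, ?_, ?_, ?_, ?_⟩ <;> simp [PySem.List.pyGetD, PySem.List.pyGet?, PySem.List.pyIdx?]

-- appending a rest column to every line
lemma dash_lines (T : List Tok) :
    (linesOf T).map (fun line => line ++ ["-"]) = linesOf (T ++ [Tok.note none]) := by
  unfold linesOf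
  rw [List.map_map]
  apply List.map_congr_left
  intro p _
  simp only [Function.comp_apply, lineOf_append]
  rfl

-- appending a bar column to every line
lemma bar_lines (T : List Tok) :
    (linesOf T).map (fun line => line ++ ["|"]) = linesOf (T ++ [Tok.bar]) := by
  unfold linesOf
  rw [List.map_map]
  apply List.map_congr_left
  intro p _
  simp only [Function.comp_apply, lineOf_append]
  rfl

-- the indexed range(6) form of a rest column
lemma dashIdx_lines (T : List Tok) :
    (PySem.List.pyRange 0 6 1).map (fun i => PySem.List.pyGetD (linesOf T) i [] ++ ["-"]) =
      linesOf (T ++ [Tok.note none]) := by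
  have hr6 : PySem.List.pyRange 0 6 1 = [0, 1, 2, 3, 4, 5] := by decide
  have hen : PySem.List.enumerate STRING_NAMES 0 =
      [(0, "E"), (1, "A"), (2, "D"), (3, "G"), (4, "B"), (5, "e")] := by decide
  simp only [hr6, linesOf, hen, List.map_cons, List.map_nil]
  obtain ⟨g0, g1, g2, g3, g4, g5⟩ := getD6 (lineOf 0 "E" T) (lineOf 1 "A" T) (lineOf 2 "D" T)
    (lineOf 3 "G" T) (lineOf 4 "B" T) (lineOf 5 "e" T) ([] : List String)
  rw [g0, g1, g2, g3, g4, g5]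
  simp only [lineOf_append]
  rfl

-- the fretted-note column: string pos.1 gets the fret digits, the others a dash
lemma notep_lines (T : List Tok) (p : Int × Int) :
    (PySem.List.pyRange 0 6 1).map (fun i =>
        if (i == p.1) = true then PySem.List.pyGetD (linesOf T) i [] ++ [PySem.Int.toStr p.2]
        else PySem.List.pyGetD (linesOf T) i [] ++ ["-"]) =
      linesOf (T ++ [Tok.note (some p)]) := by
  have hr6 : PySem.List.pyRange 0 6 1 = [0, 1, 2, 3, 4, 5] := by decide
  have hen : PySem.List.enumerate STRING_NAMES 0 =
      [(0, "E"), (1, "A"), (2, "D"), (3, "G"), (4, "B"), (5, "e")] := by decide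
  simp only [hr6, linesOf, hen, List.map_cons, List.map_nil]
  obtain ⟨g0, g1, g2, g3, g4, g5⟩ := getD6 (lineOf 0 "E" T) (lineOf 1 "A" T) (lineOf 2 "D" T)
    (lineOf 3 "G" T) (lineOf 4 "B" T) (lineOf 5 "e" T) ([] : List String)
  rw [g0, g1, g2, g3, g4, g5]
  simp only [lineOf_append, append_ite, renderTok, Bool.beq_comm]

-- the line-break column: each line gets newline + its own name + '|'
lemma brk_lines (T : List Tok) :
    (PySem.List.pyRange 0 6 1).map (fun i =>
        PySem.List.pyGetD (linesOf T) i [] ++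
          ["\n" ++ PySem.List.pyGetD STRING_NAMES i "" ++ "|"]) =
      linesOf (T ++ [Tok.brk]) := by
  have hr6 : PySem.List.pyRange 0 6 1 = [0, 1, 2, 3, 4, 5] := by decide
  have hen : PySem.List.enumerate STRING_NAMES 0 =
      [(0, "E"), (1, "A"), (2, "D"), (3, "G"), (4, "B"), (5, "e")] := by decide
  have hs0 : PySem.List.pyGetD STRING_NAMES (0 : Int) "" = "E" := by decide
  have hs1 : PySem.List.pyGetD STRING_NAMES (1 : Int) "" = "A" := by decide
  have hs2 : PySem.List.pyGetD STRING_NAMES (2 : Int) "" = "D" := by decide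
  have hs3 : PySem.List.pyGetD STRING_NAMES (3 : Int) "" = "G" := by decide
  have hs4 : PySem.List.pyGetD STRING_NAMES (4 : Int) "" = "B" := by decide
  have hs5 : PySem.List.pyGetD STRING_NAMES (5 : Int) "" = "e" := by decide
  simp only [hr6, linesOf, hen, List.map_cons, List.map_nil, hs0, hs1, hs2, hs3, hs4, hs5]
  obtain ⟨g0, g1, g2, g3, g4, g5⟩ := getD6 (lineOf 0 "E" T) (lineOf 1 "A" T) (lineOf 2 "D" T)
    (lineOf 3 "G" T) (lineOf 4 "B" T) (lineOf 5 "e" T) ([] : List String)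
  rw [g0, g1, g2, g3, g4, g5]
  simp only [lineOf_append]
  rfl

-- one iteration: A's six parallel appends are B's one token appended, rendered per string
lemma step_comm (npm mpl : Int) (est : List (String × String)) (toks : List Tok)
    (nc mc : Int) (hmc : 0 ≤ mc) :
    a_step npm mpl (linesOf toks, nc, mc) est =
      ((linesOf (b_step npm mpl (toks, nc, mc) est).1),
        (b_step npm mpl (toks, nc, mc) est).2.1, (b_step npm mpl (toks, nc, mc) est).2.2) := by
  have hgt : mc + 1 > 0 := by omega
  simp only [a_step, b_step, note_midi_eq, find_eq]
  cases hm : note_to_midi_b ((List.lookup "note" est).getD "") with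
  | none =>
    split_ifs
    all_goals rw [dash_lines]
    all_goals try rw [bar_lines]
    all_goals try rw [brk_lines]
    all_goals first
      | rfl
      | tauto
  | some m =>
    cases hp : find_pos m with
    | none =>
      simp only [hp]
      split_ifs
      all_goals rw [dashIdx_lines]
      all_goals try rw [bar_lines]
      all_goals try rw [brk_lines]
      all_goals first
        | rfl
        | tauto
    | some p =>
      simp only [hp]
      split_ifs
      all_goals rw [notep_lines]
      all_goals try rw [bar_lines]
      all_goals try rw [brk_lines]
      all_goals first
        | rfl
        | tauto

lemma b_step_mc_nonneg (npm mpl : Int) (est : List (String × String)) (toks : List Tok)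
    (nc mc : Int) (hmc : 0 ≤ mc) : 0 ≤ (b_step npm mpl (toks, nc, mc) est).2.2 := by
  unfold b_step
  by_cases h : PySem.Int.mod (nc + 1) npm == 0 <;> simp [h] <;> omega

lemma loop_comm (npm mpl : Int) (pe : List (List (String × String))) (toks : List Tok)
    (nc mc : Int) (hmc : 0 ≤ mc) :
    pe.foldl (a_step npm mpl) (linesOf toks, nc, mc) =
      (linesOf (pe.foldl (b_step npm mpl) (toks, nc, mc)).1,
        (pe.foldl (b_step npm mpl) (toks, nc, mc)).2.1,
        (pe.foldl (b_step npm mpl) (toks, nc, mc)).2.2) := by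
  induction pe generalizing toks nc mc with
  | nil => rfl
  | cons est rest ih =>
    simp only [List.foldl_cons]
    rw [step_comm npm mpl est toks nc mc hmc]
    have h2 := b_step_mc_nonneg npm mpl est toks nc mc hmc
    rcases hb : b_step npm mpl (toks, nc, mc) est with ⟨t', n', m'⟩
    rw [hb] at h2
    exact ih t' n' m' h2

-- ''.join of A's cell list equals ''.join with the head fragments fused
lemma join0_cons (a : List Char) (l : List (List Char)) :
    PySem.Chars.join [] (a :: l) = a ++ PySem.Chars.join [] l := by
  cases l with
  | nil => simp [PySem.Chars.join_singleton]
  | cons b t => rw [PySem.Chars.join_cons_cons]; simp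

lemma join0_sing_append (cs : List Char) (L : List (List Char)) :
    PySem.Chars.join [] (cs.map (fun c => [c]) ++ L) = cs ++ PySem.Chars.join [] L := by
  induction cs with
  | nil => simp
  | cons c t ih => simp [join0_cons, ih]

lemma join_head (s : String) (rest : List String) :
    PySem.Str.join "" (s.toList.map (fun c => String.ofList [c]) ++ rest) = PySem.Str.join "" (s :: rest) := by
  apply String.toList_inj.mp
  simp [PySem.Str.toList_join, List.map_map, Function.comp_def, String.toList_ofList,
        join0_sing_append, join0_cons]

-- ===== VERDICT (by name: the statement is the Claim_ definition above) =====
theorem generate_tab_spec : Claim_equal_generate_tab := by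
  intro pe npm mpl _dom _pre
  unfold Spec_generate_tab
  have hinit : (PySem.List.pyRange 0 6 1).map (fun i =>
      (PySem.List.pyGetD STRING_NAMES i "" ++ "|").toList.map (fun c => String.ofList [c])) =
      linesOf [] := by decide
  simp only [generate_tab, generate_tab_alt, hinit]
  rw [loop_comm npm mpl pe [] 0 0 (le_refl 0)]
  apply congrArg
  unfold linesOf
  rw [List.map_map]
  apply List.map_congr_left
  intro p _
  simp only [Function.comp_apply, lineOf]
  rw [join_head]
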